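-- pv_equiv track=rewrite | github.com/sonic-net/sonic-mgmt | tests/route/test_route_flap.py | get_port_by_ip
-- ===== SOURCE A (Python) =====
-- def get_port_by_ip(config_facts, ipaddr):
--     """
--     This function returns port name based on ip address
--     """
--     if ':' in ipaddr:
--         iptype = "ipv6"
--     else:
--         iptype = "ipv4"
--
--     intf = {}
--     intf.update(config_facts.get('INTERFACE', {}))
--     if "PORTCHANNEL_INTERFACE" in config_facts:
--         intf.update(config_facts['PORTCHANNEL_INTERFACE'])
--     for a_intf in intf:
--         for addrs in intf[a_intf]:
--             intf_ip = addrs.split('/')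
--             if iptype == 'ipv6' and ':' in intf_ip[0] and intf_ip[0].lower() == ipaddr.lower():
--                 return a_intf
--             elif iptype == 'ipv4' and ':' not in intf_ip[0] and intf_ip[0] == ipaddr:
--                 return a_intf
--
--     raise Exception("Did not find port for IP %s" % ipaddr)
-- ===== SOURCE B (Python) =====
-- def get_port_by_ip(config_facts, ipaddr):
--     """
--     This function returns port name based on ip address
--     """
--     intf = {}
--     intf.update(config_facts.get('INTERFACE', {}))
--     intf.update(config_facts.get('PORTCHANNEL_INTERFACE', {}))
--
--     # Build a reverse index: normalized address -> first owning port.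
--     index = {}
--     for port, addrs in intf.items():
--         for addr in addrs:
--             ip = addr.split('/')[0]
--             key = (True, ip.lower()) if ':' in ip else (False, ip)
--             index.setdefault(key, port)
--
--     want = (True, ipaddr.lower()) if ':' in ipaddr else (False, ipaddr)
--     if want in index:
--         return index[want]
--     raise Exception("Did not find port for IP %s" % ipaddr)
-- ===== Notes on version B (the rewrite author's own statement) =====
-- stated objective: alternative
-- what changed: B builds a reverse index (normalized address -> first owning port, via setdefault with IPv4/IPv6 namespaces kept separate by a tagged key) in one pass and answers with a single dict lookup, instead of A's per-query early-exit double scan with an iptype flag.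
import Mathlib
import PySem

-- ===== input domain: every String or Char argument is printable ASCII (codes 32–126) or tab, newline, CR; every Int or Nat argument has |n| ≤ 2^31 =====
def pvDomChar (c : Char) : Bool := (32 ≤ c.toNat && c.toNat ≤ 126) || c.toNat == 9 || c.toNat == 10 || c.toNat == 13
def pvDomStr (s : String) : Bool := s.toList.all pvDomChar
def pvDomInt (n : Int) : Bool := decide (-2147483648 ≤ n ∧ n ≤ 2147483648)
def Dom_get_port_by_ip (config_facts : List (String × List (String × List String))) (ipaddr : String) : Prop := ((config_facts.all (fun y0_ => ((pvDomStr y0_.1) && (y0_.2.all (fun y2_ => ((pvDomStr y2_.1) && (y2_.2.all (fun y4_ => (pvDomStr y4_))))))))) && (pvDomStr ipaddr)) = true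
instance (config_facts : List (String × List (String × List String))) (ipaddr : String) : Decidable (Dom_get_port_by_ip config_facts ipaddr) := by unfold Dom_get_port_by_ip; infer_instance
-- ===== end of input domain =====

-- B replaces A's per-query linear scan with a reverse index (normalized address -> first owning port)
-- built once and queried by a single dict lookup; objective: alternative (same cost for one query).


-- ===== PORT A =====
-- inner loop 'for addrs in intf[a_intf]'; addrs.split('/')[0] is ported with headD "" because
-- split with a non-empty separator always returns a non-empty list (the index never raises)
def pvAScan (iptype ipaddr a_intf : String) : List String → Option String
  | [] => none
  | addrs :: rest =>
      let intf_ip := (PySem.Str.split? addrs "/").getD []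
      if iptype == "ipv6" && PySem.Str.isIn ":" (intf_ip.headD "") &&
          (PySem.Str.lower (intf_ip.headD "") == PySem.Str.lower ipaddr) then some a_intf
      else if iptype == "ipv4" && !(PySem.Str.isIn ":" (intf_ip.headD "")) &&
          ((intf_ip.headD "") == ipaddr) then some a_intf
      else pvAScan iptype ipaddr a_intf rest

-- outer loop 'for a_intf in intf'
def pvAIter (iptype ipaddr : String) : List (String × List String) → Option String
  | [] => none
  | (a_intf, addrs) :: rest =>
      match pvAScan iptype ipaddr a_intf addrs with
      | some r => some r
      | none => pvAIter iptype ipaddr rest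

-- the final 'raise Exception(...)' returns no value: those inputs are excluded by Pre_, the port yields "" there
def get_port_by_ip (config_facts : List (String × List (String × List String))) (ipaddr : String) : String :=
  let iptype := if PySem.Str.isIn ":" ipaddr then "ipv6" else "ipv4"
  let cfd : PySem.Dict String (List (String × List String)) := PySem.Dict.mk config_facts
  let intf : PySem.Dict String (List String) := PySem.Dict.empty
  let intf := intf.update (cfd.getD "INTERFACE" [])
  let intf := if cfd.contains "PORTCHANNEL_INTERFACE" then intf.update (cfd.getD "PORTCHANNEL_INTERFACE" []) else intf
  (pvAIter iptype ipaddr intf.items).getD ""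

-- ===== PORT B =====
-- key = (True, ip.lower()) if ':' in ip else (False, ip)
def pvKeyB (s : String) : Bool × String :=
  if PySem.Str.isIn ":" s then (true, PySem.Str.lower s) else (false, s)

-- addr.split('/')[0] (split with non-empty separator is never empty)
def pvHeadB (addr : String) : String := ((PySem.Str.split? addr "/").getD []).headD ""

-- the index-building double loop with setdefault (first occurrence wins)
def pvIndexB (items : List (String × List String)) : PySem.Dict (Bool × String) String :=
  items.foldl (fun d p => p.2.foldl (fun d a => d.setdefault (pvKeyB (pvHeadB a)) p.1) d) PySem.Dict.empty

-- the final 'raise Exception(...)' returns no value: those inputs are excluded by Pre_, the port yields "" there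
def get_port_by_ip_alt (config_facts : List (String × List (String × List String))) (ipaddr : String) : String :=
  let cfd : PySem.Dict String (List (String × List String)) := PySem.Dict.mk config_facts
  let intf := (PySem.Dict.empty.update (cfd.getD "INTERFACE" [])).update (cfd.getD "PORTCHANNEL_INTERFACE" [])
  let index := pvIndexB intf.items
  (index.get? (pvKeyB ipaddr)).getD ""

-- ===== PRECONDITION & SPEC =====
-- helpers for Pre_ only (duplicated from the ports so Pre_'s closure reaches neither port)
def pvPreKey (s : String) : Bool × String :=
  if PySem.Str.isIn ":" s then (true, PySem.Str.lower s) else (false, s)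
def pvPreMerged (config_facts : List (String × List (String × List String))) : List (String × List String) :=
  ((PySem.Dict.empty.update ((PySem.Dict.mk config_facts).getD "INTERFACE" [])).update
    ((PySem.Dict.mk config_facts).getD "PORTCHANNEL_INTERFACE" [])).items
-- Pre_ excludes exactly the inputs on which A raises Exception("Did not find port for IP ..."):
-- some configured interface address (before its '/') must equal ipaddr, case-insensitively for IPv6
def Pre_get_port_by_ip (config_facts : List (String × List (String × List String))) (ipaddr : String) : Prop :=
  ((pvPreMerged config_facts).any (fun p =>
    p.2.any (fun a => pvPreKey (((PySem.Str.split? a "/").getD []).headD "") == pvPreKey ipaddr))) = true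
instance (config_facts : List (String × List (String × List String))) (ipaddr : String) : Decidable (Pre_get_port_by_ip config_facts ipaddr) := by unfold Pre_get_port_by_ip; infer_instance

def pvWitness_get_port_by_ip : (List (String × List (String × List String))) × String :=
  ([("INTERFACE", [("Ethernet0", ["10.0.0.1/31"])])], "10.0.0.1")

def Spec_get_port_by_ip (config_facts : List (String × List (String × List String))) (ipaddr : String) (out : String) : Prop := out = get_port_by_ip_alt config_facts ipaddr
instance (config_facts : List (String × List (String × List String))) (ipaddr : String) (out : String) : Decidable (Spec_get_port_by_ip config_facts ipaddr out) := by unfold Spec_get_port_by_ip; infer_instance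

-- ===== CLAIM (what is proved, stated in full; the proofs are below) =====
def Claim_equal_get_port_by_ip : Prop := ∀ (config_facts : List (String × List (String × List String))) (ipaddr : String), Dom_get_port_by_ip config_facts ipaddr → Pre_get_port_by_ip config_facts ipaddr → Spec_get_port_by_ip config_facts ipaddr (get_port_by_ip config_facts ipaddr)

-- ===== LEMMAS AND PROOFS =====

-- the flattened (key, port) pairs of the merged interface table
def pvFlat (items : List (String × List String)) : List ((Bool × String) × String) :=
  items.flatMap (fun p => p.2.map (fun a => (pvKeyB (pvHeadB a), p.1)))

-- A's match condition is key equality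
lemma pvMatchA_eq_key (ipaddr h : String) :
    ((if PySem.Str.isIn ":" ipaddr then "ipv6" else "ipv4") == "ipv6" && PySem.Str.isIn ":" h &&
        (PySem.Str.lower h == PySem.Str.lower ipaddr)
      || (if PySem.Str.isIn ":" ipaddr then "ipv6" else "ipv4") == "ipv4" && !(PySem.Str.isIn ":" h) &&
        (h == ipaddr))
    = (pvKeyB h == pvKeyB ipaddr) := by
  unfold pvKeyB
  by_cases hip : PySem.Str.isIn ":" ipaddr = true <;>
    by_cases hh : PySem.Str.isIn ":" h = true <;>
    simp_all [Bool.not_eq_true]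

lemma pvAScan_eq (ipaddr a_intf : String) (addrs : List String) :
    pvAScan (if PySem.Str.isIn ":" ipaddr then "ipv6" else "ipv4") ipaddr a_intf addrs
    = if addrs.any (fun a => pvKeyB (pvHeadB a) == pvKeyB ipaddr) then some a_intf else none := by
  induction addrs with
  | nil => simp [pvAScan]
  | cons a rest ih =>
    rw [pvAScan]
    have hk := pvMatchA_eq_key ipaddr (pvHeadB a)
    by_cases hm : (pvKeyB (pvHeadB a) == pvKeyB ipaddr) = true
    · rw [hm] at hk
      rcases Bool.or_eq_true_iff.mp hk with h1 | h2
      · simp only [pvHeadB] at h1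
        rw [h1]
        simp [List.any_cons, hm]
      · simp only [pvHeadB] at h2
        rw [h2]
        simp [List.any_cons, hm]
    · have hb := hk
      rw [Bool.not_eq_true] at hm
      rw [hm] at hb
      rcases Bool.or_eq_false_iff.mp hb with ⟨h1, h2⟩
      simp only [pvHeadB] at h1 h2
      rw [h1, h2]
      simp only [Bool.false_eq_true, if_false, ih, List.any_cons, hm, Bool.false_or]

lemma pvAIter_eq (ipaddr : String) (items : List (String × List String)) :
    pvAIter (if PySem.Str.isIn ":" ipaddr then "ipv6" else "ipv4") ipaddr items
    = ((pvFlat items).find? (fun q => q.1 == pvKeyB ipaddr)).map (·.2) := by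
  induction items with
  | nil => simp [pvAIter, pvFlat]
  | cons p rest ih =>
    obtain ⟨a_intf, addrs⟩ := p
    rw [pvAIter, pvAScan_eq]
    simp only [pvFlat, List.flatMap_cons, List.find?_append]
    by_cases hm : addrs.any (fun a => pvKeyB (pvHeadB a) == pvKeyB ipaddr) = true
    · rw [if_pos hm]
      obtain ⟨a, ha, hka⟩ := List.any_eq_true.mp hm
      have hfind : ((addrs.map (fun a => (pvKeyB (pvHeadB a), a_intf))).find?
          (fun q => q.1 == pvKeyB ipaddr)).isSome = true := by
        apply List.find?_isSome.mpr
        exact ⟨(pvKeyB (pvHeadB a), a_intf), List.mem_map_of_mem ha, hka⟩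
      obtain ⟨q, hq⟩ := Option.isSome_iff_exists.mp hfind
      have hq2 := List.find?_some hq
      have hqmem := List.mem_of_find?_eq_some hq
      obtain ⟨a', _, ha'⟩ := List.mem_map.mp hqmem
      rw [hq]
      simp [Option.some_or, ← ha']
    · rw [if_neg hm]
      have hnone : (addrs.map (fun a => (pvKeyB (pvHeadB a), a_intf))).find?
          (fun q => q.1 == pvKeyB ipaddr) = none := by
        rw [List.find?_eq_none]
        intro q hqmem hq
        obtain ⟨a', ha'mem, ha'⟩ := List.mem_map.mp hqmem
        apply hm
        exact List.any_eq_true.mpr ⟨a', ha'mem, by rw [← ha'] at hq; exact hq⟩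
      rw [hnone]
      simpa [pvFlat] using ih

-- lookup in a setdefault-fold: the first pair with the key wins
lemma pv_get?_foldl_setdefault (ps : List ((Bool × String) × String))
    (d : PySem.Dict (Bool × String) String) (k : Bool × String) :
    ((ps.foldl (fun d q => d.setdefault q.1 q.2) d).get? k)
    = (d.get? k).or (((ps.find? (fun q => q.1 == k)).map (·.2))) := by
  induction ps generalizing d with
  | nil => simp
  | cons q rest ih =>
    obtain ⟨qk, qv⟩ := q
    rw [List.foldl_cons, ih]
    by_cases hk : k = qk
    · subst hk
      rw [PySem.Dict.get?_setdefault_self]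
      simp only [List.find?_cons, beq_self_eq_true]
      cases hd : d.get? k <;> simp
    · rw [PySem.Dict.get?_setdefault_of_ne _ _ hk]
      have : (qk == k) = false := by simp [Ne.symm hk]
      simp [this]

lemma pvIndexB_get? (items : List (String × List String)) (k : Bool × String) :
    (pvIndexB items).get? k = ((pvFlat items).find? (fun q => q.1 == k)).map (·.2) := by
  have hfold : ∀ (its : List (String × List String)) (d : PySem.Dict (Bool × String) String),
      its.foldl (fun d p => p.2.foldl (fun d a => d.setdefault (pvKeyB (pvHeadB a)) p.1) d) d
      = (pvFlat its).foldl (fun d q => d.setdefault q.1 q.2) d := by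
    intro its
    induction its with
    | nil => intro d; simp [pvFlat]
    | cons p rest ih =>
      intro d
      rw [List.foldl_cons, ih]
      simp only [pvFlat, List.flatMap_cons, List.foldl_append]
      congr 1
      induction p.2 generalizing d with
      | nil => simp
      | cons a t iht => simp [iht]
  unfold pvIndexB
  rw [hfold, pv_get?_foldl_setdefault]
  simp

-- the two merges agree: updating with the empty list is a no-op, getD of an absent key is []
lemma pvMerge_eq (config_facts : List (String × List (String × List String))) :
    (if (PySem.Dict.mk config_facts).contains "PORTCHANNEL_INTERFACE" then
       (PySem.Dict.empty.update ((PySem.Dict.mk config_facts).getD "INTERFACE" [])).update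
         ((PySem.Dict.mk config_facts).getD "PORTCHANNEL_INTERFACE" [])
     else PySem.Dict.empty.update ((PySem.Dict.mk config_facts).getD "INTERFACE" []))
    = (PySem.Dict.empty.update ((PySem.Dict.mk config_facts).getD "INTERFACE" [])).update
        ((PySem.Dict.mk config_facts).getD "PORTCHANNEL_INTERFACE" []) := by
  set cfd : PySem.Dict String (List (String × List String)) := PySem.Dict.mk config_facts with hcfd
  by_cases hc : cfd.contains "PORTCHANNEL_INTERFACE" = true
  · simp [hc]
  · have hnone : cfd.get? "PORTCHANNEL_INTERFACE" = none := by
      rw [← Option.not_isSome_iff_eq_none, ← PySem.Dict.contains_eq_isSome_get?]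
      simp [hc]
    have hgetD : cfd.getD "PORTCHANNEL_INTERFACE" ([] : List (String × List String)) = [] := by
      rw [PySem.Dict.getD_eq_get?_getD, hnone]; rfl
    simp [hc, hgetD, PySem.Dict.update]

-- ===== VERDICT (by name: the statement is the Claim_ definition above) =====
theorem get_port_by_ip_spec : Claim_equal_get_port_by_ip := by
  intro config_facts ipaddr _ _
  unfold Spec_get_port_by_ip
  show (pvAIter (if PySem.Str.isIn ":" ipaddr then "ipv6" else "ipv4") ipaddr
      (if (PySem.Dict.mk config_facts).contains "PORTCHANNEL_INTERFACE" then
         (PySem.Dict.empty.update ((PySem.Dict.mk config_facts).getD "INTERFACE" [])).update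
           ((PySem.Dict.mk config_facts).getD "PORTCHANNEL_INTERFACE" [])
       else PySem.Dict.empty.update ((PySem.Dict.mk config_facts).getD "INTERFACE" [])).items).getD ""
    = ((pvIndexB ((PySem.Dict.empty.update ((PySem.Dict.mk config_facts).getD "INTERFACE" [])).update
        ((PySem.Dict.mk config_facts).getD "PORTCHANNEL_INTERFACE" [])).items).get? (pvKeyB ipaddr)).getD ""
  rw [pvMerge_eq, pvAIter_eq, pvIndexB_get?]
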